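-- pv_equiv track=rewrite | github.com/MarcoMiladWanees/Cipher-Tool | cipher_algos/playfair.py | playfair_formater
-- ===== SOURCE A (Python) =====
-- import string
--
-- def construct_key_map(key):
--     key_map = []
--     key = key.lower()
--     for i in range(5):
--         key_map.append([0, 0, 0, 0, 0])
--     key = key.replace(' ', '')
--     key = key.replace('j', '')
--     key = list(key)
--     key = list(dict.fromkeys(key))
--     remaining_letters = [l for l in string.ascii_lowercase if l not in key]
--     remaining_letters.remove('j')
--     for i in range(5):
--         for j in range(5):
--             if key:
--                 key_map[i][j] = (key[0])
--                 del key[0]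
--             else:
--                 break
--     for i in range(5):
--         for j in range(5):
--             if key_map[i][j] == 0:
--                 key_map[i][j] = remaining_letters[0]
--                 del remaining_letters[0]
--             else:
--                 continue
--
--     return key_map
--
-- def playfair_formater(msg, key):
--     key_map = construct_key_map(key)
--
--     msg = msg.lower()
--     msg = msg.replace(' ', '')
--     msg = msg.replace('j', 'i')
--     msg = [letter for letter in msg if letter.isalpha()]
--
--     i = 0
--     while i < (len(msg) - 1):
--         if msg[i] == msg[i + 1]:
--             msg.insert(i + 1, 'x')
--         i += 2
--
--     if len(msg) % 2 != 0:
--         msg.append('x')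
--
--     cipher = msg.copy()
--     indexes = []
--
--     for i in range(len(msg)):
--         for j in range(5):
--             if msg[i] in key_map[j]:
--                 indexes.append([j, key_map[j].index(msg[i])])
--
--     return cipher, indexes, key_map
-- ===== SOURCE B (Python) =====
-- import string
--
-- def playfair_formater(msg, key):
--     # flat 25-char order + slicing instead of a 5x5 zero-matrix with two fill passes
--     cleaned = [c for c in key.lower() if c not in ' j']
--     order = list(dict.fromkeys(cleaned)) + [l for l in string.ascii_lowercase
--                                             if l not in cleaned and l != 'j']
--     grid = order[:25]
--     key_map = [grid[r * 5:r * 5 + 5] for r in range(5)]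
--
--     letters = ['i' if c == 'j' else c for c in msg.lower() if c.isalpha()]
--
--     cipher = []
--     rest = letters
--     while rest:
--         a = rest[0]
--         if len(rest) >= 2 and rest[1] != a:
--             cipher += [a, rest[1]]
--             rest = rest[2:]
--         else:
--             cipher += [a, 'x']
--             rest = rest[1:]
--
--     indexes = [list(divmod(grid.index(ch), 5)) for ch in cipher if ch in grid]
--     return cipher, indexes, key_map
-- ===== Notes on version B (the rewrite author's own statement) =====
-- stated objective: simpler
-- what changed: construct_key_map's zero-initialised 5x5 matrix with two nested placeholder-filling passes is replaced by one flat dedup+remaining 25-char list sliced into rows, the message cleaning becomes a single comprehension, the insert-into-the-list-while-iterating x-insertion loop becomes a digram-emitting loop over a shrinking suffix, and the per-row membership/index scan per character is replaced by one flat-list index plus divmod.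
import Mathlib
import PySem

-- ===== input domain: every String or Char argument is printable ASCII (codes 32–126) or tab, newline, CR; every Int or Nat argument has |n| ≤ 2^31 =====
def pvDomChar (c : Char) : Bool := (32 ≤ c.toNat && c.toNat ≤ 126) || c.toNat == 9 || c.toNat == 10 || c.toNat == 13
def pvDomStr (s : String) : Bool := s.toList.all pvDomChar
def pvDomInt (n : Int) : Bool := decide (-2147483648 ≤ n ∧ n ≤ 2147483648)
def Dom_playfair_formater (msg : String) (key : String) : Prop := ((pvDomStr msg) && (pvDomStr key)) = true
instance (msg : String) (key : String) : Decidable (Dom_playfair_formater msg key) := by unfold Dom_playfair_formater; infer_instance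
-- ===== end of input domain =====

-- B replaces A's 5x5 zero-matrix built by two placeholder-filling passes with one flat 25-char
-- list sliced into rows, and finds grid indexes by flat position + divmod instead of a per-row
-- scan; objective: simpler (same asymptotic cost).

-- ===== PORT A =====
-- string.ascii_lowercase
def pvAscii : List Char :=
  ['a','b','c','d','e','f','g','h','i','j','k','l','m','n','o','p','q','r','s','t','u','v','w','x','y','z']

-- cells are Python's `0`-or-1-char-string: modeled as Option Char (none = the int 0 placeholder,
-- which compares equal to no string, exactly as Python's `==`/`in` treat it)
-- inner loop of pass 1: `if key: key_map[i][j] = key[0]; del key[0] else: break`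
def pvFill1 : List (Option Char) → List Char → List (Option Char) × List Char
  | [], ks => ([], ks)
  | row, [] => (row, [])          -- break: rest of the row untouched
  | _ :: rest, k :: ks =>
      let q := pvFill1 rest ks
      (some k :: q.1, q.2)

def pvPass1 : List (List (Option Char)) → List Char → List (List (Option Char)) × List Char
  | [], ks => ([], ks)
  | row :: rows, ks =>
      let q := pvFill1 row ks
      let qq := pvPass1 rows q.2
      (q.1 :: qq.1, qq.2)

-- inner loop of pass 2: `if key_map[i][j] == 0: key_map[i][j] = remaining[0]; del remaining[0]`
def pvFill2 : List (Option Char) → List Char → List (Option Char) × List Char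
  | [], rs => ([], rs)
  | none :: rest, r :: rs =>
      let q := pvFill2 rest rs
      (some r :: q.1, q.2)
  | none :: rest, [] => (none :: rest, [])   -- Python would raise IndexError; unreachable (remaining always suffices)
  | some c :: rest, rs =>
      let q := pvFill2 rest rs
      (some c :: q.1, q.2)

def pvPass2 : List (List (Option Char)) → List Char → List (List (Option Char)) × List Char
  | [], rs => ([], rs)
  | row :: rows, rs =>
      let q := pvFill2 row rs
      let qq := pvPass2 rows q.2
      (q.1 :: qq.1, qq.2)

def pvConstructKeyMap (key : String) : List (List (Option Char)) :=
  let k1 := PySem.Chars.lower key.toList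
  let k2 := PySem.Chars.replace k1 [' '] []
  let k3 := PySem.Chars.replace k2 ['j'] []
  let kd := PySem.List.dedup k3                                -- list(dict.fromkeys(key))
  let rem0 := pvAscii.filter (fun l => !(kd.contains l))
  let rem := (PySem.List.remove? rem0 'j').getD rem0           -- .remove('j'); ValueError impossible ('j' never in kd)
  let m := (pvPass1 (List.replicate 5 (List.replicate 5 (none : Option Char))) kd).1
  (pvPass2 m rem).1

-- the while loop: insert 'x' between the members of an equal pair, step by 2
def pvPairA : List Char → List Char
  | a :: b :: rest => if a = b then a :: 'x' :: pvPairA (b :: rest) else a :: b :: pvPairA rest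
  | xs => xs
  termination_by l => l.length
  decreasing_by all_goals simp

-- inner `for j in range(5): if msg[i] in key_map[j]: indexes.append([j, key_map[j].index(msg[i])])`
def pvRowScan : List (List (Option Char)) → Char → Int → List (List Int)
  | [], _, _ => []
  | row :: rows, ch, j =>
      (if row.contains (some ch) then
        [[j, (((PySem.List.index? row (some ch)).getD 0 : Nat) : Int)]]
      else []) ++ pvRowScan rows ch (j + 1)

def playfair_formater (msg : String) (key : String) : List String × List (List Int) × List (List String) :=
  let km := pvConstructKeyMap key
  let m1 := PySem.Chars.lower msg.toList
  let m2 := PySem.Chars.replace m1 [' '] []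
  let m3 := PySem.Chars.replace m2 ['j'] ['i']
  let m4 := m3.filter PySem.Chars.isalpha
  let m5 := pvPairA m4
  let m6 := if m5.length % 2 ≠ 0 then m5 ++ ['x'] else m5
  let cipher := m6.map (fun c => String.ofList [c])
  let indexes := m6.foldl (fun acc ch => acc ++ pvRowScan km ch 0) []
  (cipher, indexes, km.map (fun row => row.map (fun o => String.ofList [o.getD '?'])))
  -- o.getD '?' : every returned cell is filled (some _); '?' is never produced

-- ===== PORT B =====
-- the while loop of B: emit digrams, padding with 'x' after a repeat or at the odd end
def pvDigrams : List Char → List Char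
  | [] => []
  | [a] => [a, 'x']
  | a :: b :: rest => if b ≠ a then a :: b :: pvDigrams rest else a :: 'x' :: pvDigrams (b :: rest)
  termination_by l => l.length
  decreasing_by all_goals simp

def playfair_formater_alt (msg : String) (key : String) : List String × List (List Int) × List (List String) :=
  let cleaned := (PySem.Chars.lower key.toList).filter (fun c => !(c == ' ' || c == 'j'))
  let order := PySem.List.dedup cleaned ++ pvAscii.filter (fun c => !(cleaned.contains c) && !(c == 'j'))
  let grid := PySem.List.slice order none (some 25)            -- order[:25]
  let key_map := (List.range 5).map (fun r =>
      PySem.List.slice grid (some ((r * 5 : Nat) : Int)) (some ((r * 5 + 5 : Nat) : Int)))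
  let letters := ((PySem.Chars.lower msg.toList).filter PySem.Chars.isalpha).map
      (fun c => if c == 'j' then 'i' else c)
  let cipher := pvDigrams letters
  let indexes := cipher.filterMap (fun ch =>
      if grid.contains ch then
        some [(((PySem.List.index? grid ch).getD 0 / 5 : Nat) : Int),
              (((PySem.List.index? grid ch).getD 0 % 5 : Nat) : Int)]
      else none)
  (cipher.map (fun c => String.ofList [c]), indexes, key_map.map (fun row => row.map (fun c => String.ofList [c])))

-- ===== PRECONDITION & SPEC =====
def Spec_playfair_formater (msg : String) (key : String) (out : List String × List (List Int) × List (List String)) : Prop := out = playfair_formater_alt msg key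
instance (msg : String) (key : String) (out : List String × List (List Int) × List (List String)) : Decidable (Spec_playfair_formater msg key out) := by unfold Spec_playfair_formater; infer_instance

-- ===== CLAIM (what is proved, stated in full; the proofs are below) =====
def Claim_equal_playfair_formater : Prop := ∀ (msg : String) (key : String), Dom_playfair_formater msg key → Spec_playfair_formater msg key (playfair_formater msg key)

-- ===== LEMMAS AND PROOFS =====

theorem pv_replace_go (c : Char) (new : List Char) :
    ∀ (l : List Char) (fuel : Nat) (acc : List Char), l.length ≤ fuel →
    PySem.Chars.replace.go [c] new fuel l acc
      = acc.reverse ++ l.flatMap (fun x => if x == c then new else [x]) := by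
  intro l
  induction l with
  | nil =>
    intro fuel acc _
    cases fuel <;> simp [PySem.Chars.replace.go]
  | cons x t ih =>
    intro fuel acc h
    cases fuel with
    | zero => simp at h
    | succ f =>
      by_cases hx : x = c
      · subst hx
        rw [PySem.Chars.replace.go]
        simp [List.isPrefixOf, ih f (new.reverse ++ acc) (by simpa using h)]
      · rw [PySem.Chars.replace.go]
        simp [List.isPrefixOf, beq_iff_eq, Ne.symm hx, hx, ih f (x :: acc) (by simpa using h)]

theorem pv_replace_single (l : List Char) (c : Char) (new : List Char) :
    PySem.Chars.replace l [c] new = l.flatMap (fun x => if x == c then new else [x]) := by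
  rw [PySem.Chars.replace]
  simp [pv_replace_go c new l l.length [] le_rfl]

theorem pv_keyclean (l : List Char) :
    PySem.Chars.replace (PySem.Chars.replace l [' '] []) ['j'] []
      = l.filter (fun c => !(c == ' ' || c == 'j')) := by
  rw [pv_replace_single, pv_replace_single]
  induction l with
  | nil => simp
  | cons x t ih =>
    by_cases h1 : x = ' ' <;> by_cases h2 : x = 'j' <;> simp_all

theorem pv_msgclean (l : List Char) :
    (PySem.Chars.replace (PySem.Chars.replace l [' '] []) ['j'] ['i']).filter PySem.Chars.isalpha
      = (l.filter PySem.Chars.isalpha).map (fun c => if c == 'j' then 'i' else c) := by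
  rw [pv_replace_single, pv_replace_single]
  induction l with
  | nil => simp
  | cons x t ih =>
    by_cases h1 : x = ' '
    · subst h1; simpa [show PySem.Chars.isalpha ' ' = false by decide] using ih
    · by_cases h2 : x = 'j'
      · subst h2
        simpa [h1, List.filter_cons, show PySem.Chars.isalpha 'j' = true by decide,
          show PySem.Chars.isalpha 'i' = true by decide] using ih
      · by_cases h3 : PySem.Chars.isalpha x <;> simp_all

theorem pv_remove_j : ∀ (l : List Char) (p : Char → Bool), p 'j' = true → l.count 'j' = 1 →
    PySem.List.remove? (l.filter p) 'j' = some (l.filter (fun c => p c && !(c == 'j'))) := by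
  intro l
  induction l with
  | nil => intro p hp h; simp at h
  | cons x t ih =>
    intro p hp h
    by_cases hx : x = 'j'
    · subst hx
      have ht : t.count 'j' = 0 := by simpa using h
      have ht' : 'j' ∉ t := by simpa [List.count_eq_zero] using ht
      have heq : t.filter (fun c => p c && !(c == 'j')) = t.filter p := by
        apply List.filter_congr
        intro c hc
        have : c ≠ 'j' := fun e => ht' (e ▸ hc)
        simp [this]
      simp [hp, PySem.List.remove?_cons_self, heq]
    · have h' : t.count 'j' = 1 := by simpa [hx] using h
      by_cases hpx : p x
      · rw [List.filter_cons_of_pos (by simp [hpx])]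
        rw [PySem.List.remove?_cons_of_ne _ hx]
        simp [ih p hp h', hpx, hx]
      · simp [hpx, ih p hp h']

theorem pv_len25 (cleaned : List Char) :
    25 ≤ (PySem.List.dedup cleaned).length
        + (pvAscii.filter (fun c => !(cleaned.contains c) && !(c == 'j'))).length := by
  set kd := PySem.List.dedup cleaned with hkd
  set B := pvAscii.filter (fun c => !(c == 'j')) with hB
  have hcomm : pvAscii.filter (fun c => !(cleaned.contains c) && !(c == 'j'))
      = B.filter (fun c => !(cleaned.contains c)) := by
    rw [hB, List.filter_filter]
  have hBnodup : B.Nodup := by decide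
  have hsplit : (B.filter (fun c => !(cleaned.contains c))).length
      + (B.filter (fun c => cleaned.contains c)).length = 25 := by
    have h1 : ∀ (q : Char → Bool) (l : List Char),
        (l.filter (fun c => !(q c))).length + (l.filter q).length = l.length := by
      intro q l
      induction l with
      | nil => simp
      | cons x t ih => by_cases h : q x <;> simp [h] <;> omega
    have hBlen : B.length = 25 := by decide
    have := h1 (fun c => cleaned.contains c) B
    omega
  have hsub : (B.filter (fun c => cleaned.contains c)).length ≤ kd.length := by
    apply List.Subperm.length_le
    apply List.Nodup.subperm (hBnodup.filter _)
    intro c hc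
    have hmem : cleaned.contains c := by
      have := List.of_mem_filter hc
      simpa using this
    rw [hkd, PySem.List.mem_dedup]
    simpa using hmem
  rw [hcomm]
  omega

theorem pv_fill1_spec : ∀ (n : Nat) (ks : List Char),
    pvFill1 (List.replicate n none) ks
      = ((ks.take n).map some ++ List.replicate (n - ks.length) none, ks.drop n) := by
  intro n
  induction n with
  | zero => intro ks; simp [pvFill1]
  | succ m ih =>
    intro ks
    cases ks with
    | nil => simp [List.replicate_succ, pvFill1]
    | cons k ks => simp [List.replicate_succ, pvFill1, ih ks]

theorem pv_fill2_prefix : ∀ (a : List Char) (rest : List (Option Char)) (rs : List Char),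
    pvFill2 (a.map some ++ rest) rs = ((a.map some) ++ (pvFill2 rest rs).1, (pvFill2 rest rs).2) := by
  intro a
  induction a with
  | nil => simp
  | cons x t ih => intro rest rs; simp [pvFill2, ih]

theorem pv_fill2_replicate : ∀ (m : Nat) (rs : List Char), m ≤ rs.length →
    pvFill2 (List.replicate m none) rs = ((rs.take m).map some, rs.drop m) := by
  intro m
  induction m with
  | zero => intro rs _; simp [pvFill2]
  | succ k ih =>
    intro rs h
    cases rs with
    | nil => simp at h
    | cons r rs => simp [List.replicate_succ, pvFill2, ih rs (by simpa using h)]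

def pvChunks : Nat → List Char → List (List Char)
  | 0, _ => []
  | r + 1, l => l.take 5 :: pvChunks r (l.drop 5)

theorem pv_pass_spec : ∀ (r : Nat) (ks rs : List Char), 5 * r ≤ ks.length + rs.length →
    (pvPass2 (pvPass1 (List.replicate r (List.replicate 5 (none : Option Char))) ks).1 rs).1
      = (pvChunks r (ks ++ rs)).map (List.map some) := by
  intro r
  induction r with
  | zero => intro ks rs _; simp [pvPass1, pvPass2, pvChunks]
  | succ n ih =>
    intro ks rs h
    have hm : 5 - ks.length ≤ rs.length := by omega
    rw [List.replicate_succ]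
    simp only [pvPass1, pvPass2, pvChunks]
    rw [pv_fill1_spec]
    simp only []
    rw [pv_fill2_prefix, pv_fill2_replicate _ _ hm]
    have htake : (ks ++ rs).take 5 = ks.take 5 ++ rs.take (5 - ks.length) := List.take_append ..
    have hdrop : (ks ++ rs).drop 5 = ks.drop 5 ++ rs.drop (5 - ks.length) := List.drop_append ..
    rw [htake, hdrop]
    have := ih (ks.drop 5) (rs.drop (5 - ks.length)) (by simp; omega)
    simpa [List.replicate] using this

theorem pv_index?_map_some (l : List Char) (ch : Char) :
    PySem.List.index? (l.map some) (some ch) = PySem.List.index? l ch := by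
  induction l with
  | nil => simp [PySem.List.index?]
  | cons x t ih =>
    by_cases h : x = ch
    · subst h
      rw [List.map_cons, PySem.List.index?_cons_self, PySem.List.index?_cons_self]
    · rw [List.map_cons, PySem.List.index?_cons_of_ne _ (by simpa using h),
        PySem.List.index?_cons_of_ne _ h, ih]

theorem pv_index?_append_of_not_mem (l t : List Char) (v : Char) (h : v ∉ l) :
    PySem.List.index? (l ++ t) v = (PySem.List.index? t v).map (· + l.length) := by
  induction l with
  | nil => simp [Option.map_id']
  | cons x r ih =>
    have hx : x ≠ v := fun e => h (by simp [e])
    rw [List.cons_append, PySem.List.index?_cons_of_ne _ hx, ih (fun hm => h (by simp [hm]))]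
    cases PySem.List.index? t v <;> simp
    omega

theorem pv_scan_spec : ∀ (rows : List (List Char)) (ch : Char) (j : Int),
    (rows.flatten).Nodup → (∀ r ∈ rows, r.length = 5) →
    pvRowScan (rows.map (List.map some)) ch j =
      (match PySem.List.index? rows.flatten ch with
      | none => []
      | some p => [[j + ((p / 5 : Nat) : Int), ((p % 5 : Nat) : Int)]]) := by
  intro rows
  induction rows with
  | nil => intro ch j _ _; simp [pvRowScan, PySem.List.index?]
  | cons r rest ih =>
    intro ch j hnd hlen
    have hnd2 := List.nodup_append.mp (by simpa using hnd)
    have hnd' : rest.flatten.Nodup := hnd2.2.1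
    have hr5 : r.length = 5 := hlen r (by simp)
    have hlen' : ∀ q ∈ rest, q.length = 5 := fun q hq => hlen q (by simp [hq])
    rw [List.flatten_cons]
    by_cases hmem : ch ∈ r
    · have h1 : PySem.List.index? (r ++ rest.flatten) ch = PySem.List.index? r ch :=
        PySem.List.index?_append_of_mem _ hmem
      have hsome : (PySem.List.index? r ch).isSome :=
        (PySem.List.index?_isSome_iff r ch).mpr hmem
      obtain ⟨p, hp⟩ := Option.isSome_iff_exists.mp hsome
      have hplt : p < 5 := by
        obtain ⟨hk, -, -⟩ := PySem.List.getElem_of_index?_eq_some hp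
        omega
      have hnotrest : ch ∉ rest.flatten := fun hc => hnd2.2.2 ch hmem ch hc rfl
      have hnone : PySem.List.index? rest.flatten ch = none :=
        (PySem.List.index?_eq_none_iff _ _).mpr hnotrest
      have htail : pvRowScan (rest.map (List.map some)) ch (j + 1) = [] := by
        rw [ih ch (j + 1) hnd' hlen', hnone]
      simp only [pvRowScan, List.map_cons]
      rw [htail, h1, hp]
      have hconts : (r.map some).contains (some ch) = true := by
        simp; exact hmem
      rw [pv_index?_map_some, hp]
      simp [Nat.div_eq_of_lt hplt, Nat.mod_eq_of_lt hplt]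
      exact hmem
    · have h1 : PySem.List.index? (r ++ rest.flatten) ch
          = (PySem.List.index? rest.flatten ch).map (· + 5) := by
        rw [pv_index?_append_of_not_mem _ _ _ hmem, hr5]
      have hconts : (r.map some).contains (some ch) = false := by
        simp; exact hmem
      simp only [pvRowScan, List.map_cons]
      rw [ih ch (j + 1) hnd' hlen', h1, hconts]
      rcases h : PySem.List.index? rest.flatten ch with _ | q
      · simp
      · have e1 : (q + 5) / 5 = q / 5 + 1 := by omega
        have e2 : (q + 5) % 5 = q % 5 := by omega
        simp [e1, e2]
        ring

theorem pv_digram_eq (l : List Char) :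
    pvDigrams l = (if (pvPairA l).length % 2 ≠ 0 then pvPairA l ++ ['x'] else pvPairA l) := by
  induction l using pvPairA.induct with
  | case1 b rest ih =>
    rw [pvPairA, pvDigrams]
    rw [if_pos rfl, if_neg (show ¬(b ≠ b) from fun h => h rfl)]
    rw [ih]
    by_cases h : (pvPairA (b :: rest)).length % 2 ≠ 0
    · simp only [if_pos h]
      have : ((pvPairA (b :: rest)).length + 1 + 1) % 2 ≠ 0 := by omega
      simp [this]
    · simp only [if_neg h]
      have : ¬((pvPairA (b :: rest)).length + 1 + 1) % 2 ≠ 0 := by omega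
      simp [this]
  | case2 a b rest hab ih =>
    rw [pvPairA, pvDigrams]
    simp only [if_neg hab, if_pos (Ne.symm hab)]
    rw [ih]
    by_cases h : (pvPairA rest).length % 2 ≠ 0
    · simp only [if_pos h]
      have : ((pvPairA rest).length + 1 + 1) % 2 ≠ 0 := by omega
      simp [this]
    · simp only [if_neg h]
      have : ¬((pvPairA rest).length + 1 + 1) % 2 ≠ 0 := by omega
      simp [this]
  | case3 xs h1 =>
    match xs, h1 with
    | [], _ => simp [pvPairA, pvDigrams]
    | [a], _ => simp [pvPairA, pvDigrams]
    | a :: b :: rest, h => exact absurd (h a b rest rfl) (fun f => f)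

theorem pv_flatten_chunks : ∀ (r : Nat) (l : List Char), (pvChunks r l).flatten = l.take (5 * r) := by
  intro r
  induction r with
  | zero => intro l; simp [pvChunks]
  | succ n ih =>
    intro l
    rw [pvChunks, List.flatten_cons, ih]
    rw [show 5 * (n + 1) = 5 + 5 * n by ring, List.take_add]

theorem pv_chunk_len : ∀ (r : Nat) (l : List Char), 5 * r ≤ l.length →
    ∀ c ∈ pvChunks r l, c.length = 5 := by
  intro r
  induction r with
  | zero => intro l h c hc; simp [pvChunks] at hc
  | succ n ih =>
    intro l h c hc
    simp only [pvChunks, List.mem_cons] at hc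
    rcases hc with hc | hc
    · subst hc; simp; omega
    · exact ih _ (by simp; omega) c hc

theorem pv_rows_eq (order : List Char) :
    (List.range 5).map (fun r =>
        PySem.List.slice (List.take 25 order) (some ((r * 5 : Nat) : Int)) (some ((r * 5 + 5 : Nat) : Int)))
      = pvChunks 5 order := by
  have hrow : ∀ k : Nat, k + 5 ≤ 25 →
      ((List.take 25 order).drop k).take 5 = (order.drop k).take 5 := by
    intro k hk
    rw [List.drop_take]
    rw [List.take_take]
    congr 1
    omega
  rw [show List.range 5 = [0, 1, 2, 3, 4] from rfl]
  simp only [List.map_cons, List.map_nil, PySem.List.slice_natCast]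
  simp only [pvChunks, List.drop_drop]
  norm_num
  exact ⟨hrow 0 (by omega), hrow 5 (by omega), hrow 10 (by omega), hrow 15 (by omega), hrow 20 (by omega)⟩

theorem pv_flatMap_filterMap (m : List Char) (f : Char → List (List Int)) (g : Char → Option (List Int))
    (h : ∀ ch, f ch = (g ch).toList) : m.flatMap f = m.filterMap g := by
  induction m with
  | nil => simp
  | cons x t ih =>
    rw [List.flatMap_cons, List.filterMap_cons, ih, h x]
    cases g x <;> simp

-- ===== VERDICT (by name: the statement is the Claim_ definition above) =====
theorem playfair_formater_spec : Claim_equal_playfair_formater := by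
  intro msg key _
  unfold Spec_playfair_formater playfair_formater playfair_formater_alt pvConstructKeyMap
  simp only [pv_keyclean, pv_msgclean]
  set cleaned := (PySem.Chars.lower key.toList).filter (fun c => !(c == ' ' || c == 'j')) with hcleaned
  set kd := PySem.List.dedup cleaned with hkd
  set remB := pvAscii.filter (fun c => !(cleaned.contains c) && !(c == 'j')) with hremB
  set order := kd ++ remB with horder
  set letters := ((PySem.Chars.lower msg.toList).filter PySem.Chars.isalpha).map
      (fun c => if c == 'j' then 'i' else c) with hletters
  -- the key list never contains 'j'
  have hjcl : 'j' ∉ cleaned := by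
    intro h
    have := List.of_mem_filter h
    simp at this
  have hjkd : 'j' ∉ kd := fun h => hjcl ((PySem.List.mem_dedup _ _).mp h)
  -- remaining_letters.remove('j')
  have hrem : PySem.List.remove? (pvAscii.filter (fun l => !(kd.contains l))) 'j'
      = some (pvAscii.filter (fun c => !(kd.contains c) && !(c == 'j'))) :=
    pv_remove_j pvAscii _ (by simp [hjkd]) (by decide)
  have hremEq : pvAscii.filter (fun c => !(kd.contains c) && !(c == 'j')) = remB := by
    apply List.filter_congr
    intro c _
    have : (c ∈ kd) ↔ (c ∈ cleaned) := PySem.List.mem_dedup _ _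
    by_cases hc : c ∈ cleaned <;> simp_all
  have h25 : 25 ≤ order.length := by
    rw [horder, List.length_append]
    exact pv_len25 cleaned
  have hpass := pv_pass_spec 5 kd remB (by
    have := h25
    rw [horder, List.length_append] at this
    omega)
  -- nodup of the flat grid
  have hnodup : order.Nodup := by
    rw [horder]
    apply List.Nodup.append (PySem.List.nodup_dedup _) ((by decide : pvAscii.Nodup).filter _)
    intro c hckd hcrem
    have h1 : c ∈ cleaned := (PySem.List.mem_dedup _ _).mp hckd
    have := List.of_mem_filter hcrem
    simp_all
  have hgridnodup : (order.take 25).Nodup := hnodup.sublist (List.take_sublist _ _)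
  have hflat : (pvChunks 5 order).flatten = order.take 25 := pv_flatten_chunks 5 order
  have hlens : ∀ c ∈ pvChunks 5 order, c.length = 5 := pv_chunk_len 5 order (by omega)
  -- grid of B
  have hgrid : PySem.List.slice order none (some 25) = order.take 25 := by
    rw [PySem.List.slice_to _ (by norm_num)]
    rfl
  -- per-character index lookup
  have hscan : ∀ ch : Char, pvRowScan ((pvChunks 5 order).map (List.map some)) ch 0
      = ((fun ch => if (order.take 25).contains ch then
            some [(((PySem.List.index? (order.take 25) ch).getD 0 / 5 : Nat) : Int),
                  (((PySem.List.index? (order.take 25) ch).getD 0 % 5 : Nat) : Int)]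
          else none) ch).toList := by
    intro ch
    rw [pv_scan_spec (pvChunks 5 order) ch 0 (hflat ▸ hgridnodup) hlens, hflat]
    by_cases hm : ch ∈ order.take 25
    · have hsome : (PySem.List.index? (order.take 25) ch).isSome :=
        (PySem.List.index?_isSome_iff _ _).mpr hm
      obtain ⟨p, hp⟩ := Option.isSome_iff_exists.mp hsome
      rw [hp]
      have hc' : (order.take 25).contains ch = true := by
        simpa using hm
      simp only [hc', if_true, hp, Option.getD_some, Option.toList_some, zero_add]
    · have hnone : PySem.List.index? (order.take 25) ch = none :=
        (PySem.List.index?_eq_none_iff _ _).mpr hm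
      have hc' : (order.take 25).contains ch = false := by
        simpa using hm
      rw [hnone]
      simp only [hc', Bool.false_eq_true, if_false, Option.toList_none]
  refine Prod.ext ?_ (Prod.ext ?_ ?_)
  · -- cipher
    simp only [pv_digram_eq]
  · -- indexes
    simp only [hrem, Option.getD_some, hremEq, hpass, pv_digram_eq, hgrid]
    rw [PySem.List.foldl_append_eq_flatMap]
    rw [pv_flatMap_filterMap _ _ _ hscan]
    simp
  · -- key_map
    simp only [hrem, Option.getD_some, hremEq, hpass, hgrid, pv_rows_eq order]
    simp only [List.map_map, Function.comp_def, Option.getD_some]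
    rw [← horder]
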